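-- pv_equiv track=rewrite | github.com/thehalleyyoung/halley-labs | causal-shielded-adaptive-trading/implementation/causal_trading/evaluation/causal_accuracy.py | _arrowhead_counts
-- ===== SOURCE A (Python) =====
-- from typing import Any, Dict, List, Optional, Set, Tuple
--
-- Edge = Tuple[int, int]  # (source, target)
--
-- def _edge_set_to_skeleton(edges: Set[Edge]) -> Set[frozenset]:
--     """Convert directed edge set to undirected skeleton."""
--     return {frozenset((u, v)) for u, v in edges}
--
-- def _arrowhead_counts(
--     true_edges: Set[Edge],
--     est_edges: Set[Edge],
-- ) -> Tuple[int, int, int]: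
--     """Compute arrowhead TP, FP, FN.
--
--     For each pair (i,j) that appears in both skeletons, check if the
--     orientation (direction) matches.
--
--     Returns (tp, fp, fn)
--     """
--     true_skel = _edge_set_to_skeleton(true_edges)
--     est_skel = _edge_set_to_skeleton(est_edges)
--     common = true_skel & est_skel
--
--     tp = 0
--     fp = 0
--     fn = 0
--     for pair in common:
--         nodes = tuple(pair)
--         u, v = nodes[0], nodes[1] if len(nodes) == 2 else nodes[0]
--         if len(nodes) < 2:
--             continue
--         u, v = nodes
--
--         true_uv = (u, v) in true_edges
--         true_vu = (v, u) in true_edges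
--         est_uv = (u, v) in est_edges
--         est_vu = (v, u) in est_edges
--
--         # Arrowhead at v for edge u→v
--         if true_uv and est_uv:
--             tp += 1
--         elif true_uv and not est_uv:
--             fn += 1
--
--         if true_vu and est_vu:
--             tp += 1
--         elif true_vu and not est_vu:
--             fn += 1
--
--         if est_uv and not true_uv:
--             fp += 1
--         if est_vu and not true_vu:
--             fp += 1
--
--     return tp, fp, fn
-- ===== SOURCE B (Python) =====
-- def _arrowhead_counts(true_edges, est_edges):
--     tp = sum(1 for a, b in true_edges if a != b and (a, b) in est_edges)
--     fn = sum(1 for a, b in true_edges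
--              if a != b and (a, b) not in est_edges and (b, a) in est_edges)
--     fp = sum(1 for a, b in est_edges
--              if a != b and (a, b) not in true_edges and (b, a) in true_edges)
--     return tp, fp, fn
-- ===== Notes on version B (the rewrite author's own statement) =====
-- stated objective: simpler
-- what changed: Drops the skeleton/frozenset construction and the common-pair loop entirely: each count is a single direct scan of one edge set with membership tests ((a,b) in the other set, and (b,a) for the misoriented cases), skipping self-loops.
import Mathlib
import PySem

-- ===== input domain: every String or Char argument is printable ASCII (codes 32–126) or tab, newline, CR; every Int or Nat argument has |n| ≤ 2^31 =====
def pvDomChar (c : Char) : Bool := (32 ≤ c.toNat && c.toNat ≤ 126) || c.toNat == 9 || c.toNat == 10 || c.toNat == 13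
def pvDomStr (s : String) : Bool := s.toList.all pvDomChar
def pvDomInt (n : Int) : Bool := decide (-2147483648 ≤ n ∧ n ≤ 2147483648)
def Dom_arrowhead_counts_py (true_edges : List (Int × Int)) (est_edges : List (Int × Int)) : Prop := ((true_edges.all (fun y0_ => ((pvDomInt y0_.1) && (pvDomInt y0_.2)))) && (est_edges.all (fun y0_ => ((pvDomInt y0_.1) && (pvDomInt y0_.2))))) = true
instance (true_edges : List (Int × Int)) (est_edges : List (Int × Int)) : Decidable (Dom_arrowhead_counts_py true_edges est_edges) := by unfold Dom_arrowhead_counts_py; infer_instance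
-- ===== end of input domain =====

-- B drops the skeleton construction: each count is one direct scan of an edge set
-- with membership tests (objective: simpler decomposition; same asymptotic cost).


-- ===== PORT A =====
-- frozenset((u,v)) is represented by the pair ordered ascending (equal as a 2-element set).
def pvNorm (e : Int × Int) : Int × Int := if e.1 ≤ e.2 then e else (e.2, e.1)

def pvSkeleton (edges : List (Int × Int)) : PySem.Set (Int × Int) :=
  PySem.Set.ofList (edges.map pvNorm)

def pvStep (true_edges est_edges : List (Int × Int)) (acc : Int × Int × Int)
    (pair : Int × Int) : Int × Int × Int :=
  -- `len(nodes) < 2` (a self-loop pair) → continue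
  if pair.1 = pair.2 then acc
  else
    let u := pair.1
    let v := pair.2
    let true_uv := decide ((u, v) ∈ true_edges)
    let true_vu := decide ((v, u) ∈ true_edges)
    let est_uv := decide ((u, v) ∈ est_edges)
    let est_vu := decide ((v, u) ∈ est_edges)
    let tp := acc.1
    let fp := acc.2.1
    let fn := acc.2.2
    let (tp, fn) :=
      if true_uv && est_uv then (tp + 1, fn)
      else if true_uv && !est_uv then (tp, fn + 1)
      else (tp, fn)
    let (tp, fn) :=
      if true_vu && est_vu then (tp + 1, fn)
      else if true_vu && !est_vu then (tp, fn + 1)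
      else (tp, fn)
    let fp := if est_uv && !true_uv then fp + 1 else fp
    let fp := if est_vu && !true_vu then fp + 1 else fp
    (tp, fp, fn)

def arrowhead_counts_py (true_edges : List (Int × Int)) (est_edges : List (Int × Int)) : Int × Int × Int :=
  let true_skel := pvSkeleton true_edges
  let est_skel := pvSkeleton est_edges
  let common := PySem.Set.inter true_skel est_skel
  common.foldl (pvStep true_edges est_edges) (0, 0, 0)

-- ===== PORT B =====
def arrowhead_counts_py_alt (true_edges : List (Int × Int)) (est_edges : List (Int × Int)) : Int × Int × Int :=
  let tp := true_edges.countP (fun p =>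
    decide (p.1 ≠ p.2) && decide (p ∈ est_edges))
  let fn := true_edges.countP (fun p =>
    decide (p.1 ≠ p.2) && !decide (p ∈ est_edges) && decide ((p.2, p.1) ∈ est_edges))
  let fp := est_edges.countP (fun p =>
    decide (p.1 ≠ p.2) && !decide (p ∈ true_edges) && decide ((p.2, p.1) ∈ true_edges))
  ((tp : Int), (fp : Int), (fn : Int))

-- ===== PRECONDITION & SPEC =====
-- The Python arguments are sets; Pre_ requires the encoding lists to be duplicate-free,
-- i.e. to be valid encodings of sets (a list with duplicates encodes no Python input).
def Pre_arrowhead_counts_py (true_edges : List (Int × Int)) (est_edges : List (Int × Int)) : Prop :=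
  true_edges.Nodup ∧ est_edges.Nodup
instance (true_edges : List (Int × Int)) (est_edges : List (Int × Int)) : Decidable (Pre_arrowhead_counts_py true_edges est_edges) := by unfold Pre_arrowhead_counts_py; infer_instance

def pvWitness_arrowhead_counts_py : (List (Int × Int)) × (List (Int × Int)) :=
  ([(0, 1), (1, 2)], [(1, 0), (1, 2)])

def Spec_arrowhead_counts_py (true_edges : List (Int × Int)) (est_edges : List (Int × Int)) (out : Int × Int × Int) : Prop := out = arrowhead_counts_py_alt true_edges est_edges
instance (true_edges : List (Int × Int)) (est_edges : List (Int × Int)) (out : Int × Int × Int) : Decidable (Spec_arrowhead_counts_py true_edges est_edges out) := by unfold Spec_arrowhead_counts_py; infer_instance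

-- ===== CLAIM (what is proved, stated in full; the proofs are below) =====
def Claim_equal_arrowhead_counts_py : Prop := ∀ (true_edges : List (Int × Int)) (est_edges : List (Int × Int)), Dom_arrowhead_counts_py true_edges est_edges → Pre_arrowhead_counts_py true_edges est_edges → Spec_arrowhead_counts_py true_edges est_edges (arrowhead_counts_py true_edges est_edges)

-- ===== LEMMAS AND PROOFS =====

lemma mem_map_pvNorm (l : List (Int × Int)) (p : Int × Int) :
    p ∈ l.map pvNorm ↔ p.1 ≤ p.2 ∧ (p ∈ l ∨ (p.2, p.1) ∈ l) := by
  rw [List.mem_map]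
  constructor
  · rintro ⟨q, hq, rfl⟩
    by_cases h : q.1 ≤ q.2 <;> simp [pvNorm, h, hq] <;> omega
  · rintro ⟨h, hp | hs⟩
    · exact ⟨p, hp, by simp [pvNorm, h]⟩
    · refine ⟨(p.2, p.1), hs, ?_⟩
      obtain ⟨x, y⟩ := p
      simp only [pvNorm]
      split_ifs with h2
      · have hxy : x = y := le_antisymm h h2
        subst hxy; rfl
      · rfl

lemma nodup_common (t e : List (Int × Int)) :
    (PySem.Set.inter (pvSkeleton t) (pvSkeleton e)).Nodup := by
  apply PySem.Set.nodup_inter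
  exact PySem.Set.nodup_ofList _

lemma mem_common (t e : List (Int × Int)) (p : Int × Int) :
    p ∈ PySem.Set.inter (pvSkeleton t) (pvSkeleton e) ↔
      p ∈ t.map pvNorm ∧ p ∈ e.map pvNorm := by
  simp [pvSkeleton, PySem.Set.mem_inter, PySem.Set.mem_ofList]

lemma countP_eq_card {α : Type} [DecidableEq α] {l : List α} (h : l.Nodup) (p : α → Bool) :
    l.countP p = (l.toFinset.filter (fun a => p a = true)).card := by
  rw [← List.toFinset_filter, List.toFinset_card_of_nodup (h.filter p),
    List.countP_eq_length_filter]

def pvI (b : Bool) : Int := if b then 1 else 0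

lemma pvStep_eq (t e : List (Int × Int)) (acc : Int × Int × Int) (p : Int × Int) :
    pvStep t e acc p =
      (acc.1 + pvI (decide (p.1 ≠ p.2) && decide (p ∈ t) && decide (p ∈ e))
             + pvI (decide (p.1 ≠ p.2) && decide ((p.2, p.1) ∈ t) && decide ((p.2, p.1) ∈ e)),
       acc.2.1 + pvI (decide (p.1 ≠ p.2) && decide (p ∈ e) && !decide (p ∈ t))
               + pvI (decide (p.1 ≠ p.2) && decide ((p.2, p.1) ∈ e) && !decide ((p.2, p.1) ∈ t)),
       acc.2.2 + pvI (decide (p.1 ≠ p.2) && decide (p ∈ t) && !decide (p ∈ e))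
               + pvI (decide (p.1 ≠ p.2) && decide ((p.2, p.1) ∈ t) && !decide ((p.2, p.1) ∈ e))) := by
  obtain ⟨a, b, c⟩ := acc
  by_cases h0 : p.1 = p.2 <;>
    by_cases h1 : p ∈ t <;>
    by_cases h2 : (p.2, p.1) ∈ t <;>
    by_cases h3 : p ∈ e <;>
    by_cases h4 : (p.2, p.1) ∈ e <;>
      simp [pvStep, pvI, h0, h1, h2, h3, h4]

-- The foldl over the common pairs adds, componentwise, counts of six predicates.
lemma foldl_pvStep (t e l : List (Int × Int)) (a b c : Int) :
    l.foldl (pvStep t e) (a, b, c) =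
      (a + ((l.countP (fun p => decide (p.1 ≠ p.2) && decide (p ∈ t) && decide (p ∈ e)) : Int)
          + (l.countP (fun p => decide (p.1 ≠ p.2) && decide ((p.2, p.1) ∈ t) && decide ((p.2, p.1) ∈ e)) : Int)),
       b + ((l.countP (fun p => decide (p.1 ≠ p.2) && decide (p ∈ e) && !decide (p ∈ t)) : Int)
          + (l.countP (fun p => decide (p.1 ≠ p.2) && decide ((p.2, p.1) ∈ e) && !decide ((p.2, p.1) ∈ t)) : Int)),
       c + ((l.countP (fun p => decide (p.1 ≠ p.2) && decide (p ∈ t) && !decide (p ∈ e)) : Int)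
          + (l.countP (fun p => decide (p.1 ≠ p.2) && decide ((p.2, p.1) ∈ t) && !decide ((p.2, p.1) ∈ e)) : Int))) := by
  induction l generalizing a b c with
  | nil => simp
  | cons x xs ih =>
    rw [List.foldl_cons, pvStep_eq, ih]
    simp only [List.countP_cons]
    by_cases h0 : x.1 = x.2 <;>
      by_cases h1 : x ∈ t <;>
      by_cases h2 : (x.2, x.1) ∈ t <;>
      by_cases h3 : x ∈ e <;>
      by_cases h4 : (x.2, x.1) ∈ e <;>
        simp [pvI, h0, h1, h2, h3, h4] <;> push_cast <;> omega

-- The common skeleton as a Finset.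
def pvCF (t e : List (Int × Int)) : Finset (Int × Int) :=
  (PySem.Set.inter (pvSkeleton t) (pvSkeleton e)).toFinset

lemma mem_pvCF (t e : List (Int × Int)) (p : Int × Int) :
    p ∈ pvCF t e ↔ p.1 ≤ p.2 ∧ (p ∈ t ∨ (p.2, p.1) ∈ t) ∧ (p ∈ e ∨ (p.2, p.1) ∈ e) := by
  rw [pvCF, List.mem_toFinset, mem_common, mem_map_pvNorm, mem_map_pvNorm]
  tauto

lemma pvCF_comm (t e : List (Int × Int)) : pvCF t e = pvCF e t := by
  ext p
  rw [mem_pvCF, mem_pvCF]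
  tauto

lemma card_filter_split (s : Finset (Int × Int)) (Q : Int × Int → Bool) :
    (s.filter (fun p => (decide (p.1 ≠ p.2) && Q p) = true)).card
      = (s.filter (fun p => p.1 < p.2 ∧ Q p = true)).card
      + (s.filter (fun p => p.2 < p.1 ∧ Q p = true)).card := by
  rw [← Finset.card_union_of_disjoint]
  · congr 1
    ext p
    by_cases hq : Q p = true <;> by_cases hs : p ∈ s <;> simp [hq, hs] <;> omega
  · rw [Finset.disjoint_left]
    intro p h1 h2
    simp only [Finset.mem_filter] at h1 h2
    omega

-- forward direction: common pairs carrying the forward edge of t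
lemma card_fwd (t e : List (Int × Int)) (X : Int × Int → Bool) :
    ((pvCF t e).filter
        (fun p => (decide (p.1 ≠ p.2) && decide (p ∈ t) && X p) = true)).card
      = (t.toFinset.filter
          (fun p => p.1 < p.2 ∧ (p ∈ e ∨ (p.2, p.1) ∈ e) ∧ X p = true)).card := by
  congr 1
  ext p
  simp only [Finset.mem_filter, mem_pvCF, Bool.and_eq_true, decide_eq_true_eq,
    List.mem_toFinset]
  constructor
  · rintro ⟨⟨hle, _, hee⟩, ⟨hne, hpt⟩, hx⟩
    exact ⟨hpt, lt_of_le_of_ne hle hne, hee, hx⟩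
  · rintro ⟨hpt, hlt, hee, hx⟩
    exact ⟨⟨le_of_lt hlt, Or.inl hpt, hee⟩, ⟨ne_of_lt hlt, hpt⟩, hx⟩

-- backward direction: swapping the pair is a bijection onto the reversed-edge side
lemma card_bwd (t e : List (Int × Int)) (X : Int × Int → Bool) :
    ((pvCF t e).filter
        (fun p => (decide (p.1 ≠ p.2) && decide ((p.2, p.1) ∈ t) && X (p.2, p.1)) = true)).card
      = (t.toFinset.filter
          (fun p => p.2 < p.1 ∧ (p ∈ e ∨ (p.2, p.1) ∈ e) ∧ X p = true)).card := by
  apply Finset.card_bij' (fun p _ => ((p.2, p.1) : Int × Int)) (fun q _ => ((q.2, q.1) : Int × Int))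
  · intro p hp
    obtain ⟨x, y⟩ := p
    simp only [Finset.mem_filter, mem_pvCF, Bool.and_eq_true, decide_eq_true_eq] at hp
    obtain ⟨⟨hle, hmt, hme⟩, ⟨hne, hqt⟩, hx⟩ := hp
    simp only [Finset.mem_filter, List.mem_toFinset]
    refine ⟨hqt, by omega, ?_, hx⟩
    tauto
  · intro q hq
    obtain ⟨x, y⟩ := q
    simp only [Finset.mem_filter, List.mem_toFinset] at hq
    obtain ⟨hqt, hlt, hme, hx⟩ := hq
    simp only [Finset.mem_filter, mem_pvCF, Bool.and_eq_true, decide_eq_true_eq]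
    exact ⟨⟨le_of_lt hlt, Or.inr hqt, by tauto⟩, ⟨by omega, hqt⟩, hx⟩
  · intro p _
    rfl
  · intro q _
    rfl

-- A's two counts over the common skeleton equal B's single scan: tp
lemma comp_tp (t e : List (Int × Int)) (ht : t.Nodup) :
    (PySem.Set.inter (pvSkeleton t) (pvSkeleton e)).countP
        (fun p => decide (p.1 ≠ p.2) && decide (p ∈ t) && decide (p ∈ e))
      + (PySem.Set.inter (pvSkeleton t) (pvSkeleton e)).countP
        (fun p => decide (p.1 ≠ p.2) && decide ((p.2, p.1) ∈ t) && decide ((p.2, p.1) ∈ e))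
      = t.countP (fun p => decide (p.1 ≠ p.2) && decide (p ∈ e)) := by
  rw [countP_eq_card (nodup_common t e), countP_eq_card (nodup_common t e), countP_eq_card ht]
  have hC : List.toFinset (PySem.Set.inter (pvSkeleton t) (pvSkeleton e)) = pvCF t e := rfl
  rw [hC]
  have h1 := card_fwd t e (fun p => decide (p ∈ e))
  have h2 := card_bwd t e (fun p => decide (p ∈ e))
  have h3 := card_filter_split t.toFinset (fun p => decide (p ∈ e))
  simp only [decide_eq_true_eq] at h1 h2 h3 ⊢
  rw [h1, h2, h3]
  congr 1 <;> apply congrArg <;> apply Finset.filter_congr <;> intro p _ <;>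
    constructor <;> intro h <;> tauto

-- fn
lemma comp_fn (t e : List (Int × Int)) (ht : t.Nodup) :
    (PySem.Set.inter (pvSkeleton t) (pvSkeleton e)).countP
        (fun p => decide (p.1 ≠ p.2) && decide (p ∈ t) && !decide (p ∈ e))
      + (PySem.Set.inter (pvSkeleton t) (pvSkeleton e)).countP
        (fun p => decide (p.1 ≠ p.2) && decide ((p.2, p.1) ∈ t) && !decide ((p.2, p.1) ∈ e))
      = t.countP (fun p => decide (p.1 ≠ p.2) && !decide (p ∈ e) && decide ((p.2, p.1) ∈ e)) := by
  rw [countP_eq_card (nodup_common t e), countP_eq_card (nodup_common t e), countP_eq_card ht]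
  have hC : List.toFinset (PySem.Set.inter (pvSkeleton t) (pvSkeleton e)) = pvCF t e := rfl
  rw [hC]
  have h1 := card_fwd t e (fun p => !decide (p ∈ e))
  have h2 := card_bwd t e (fun p => !decide (p ∈ e))
  have h3 := card_filter_split t.toFinset
    (fun p => !decide (p ∈ e) && decide ((p.2, p.1) ∈ e))
  simp only [decide_eq_true_eq, Bool.and_eq_true, Bool.not_eq_eq_eq_not, Bool.not_true,
    decide_eq_false_iff_not, Bool.and_assoc] at h1 h2 h3 ⊢
  rw [h1, h2, h3]
  congr 1 <;> apply congrArg <;> apply Finset.filter_congr <;> intro p _ <;>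
    constructor <;> intro h <;> tauto

-- fp: the same as fn with the roles of the two edge sets exchanged
lemma comp_fp (t e : List (Int × Int)) (he : e.Nodup) :
    (PySem.Set.inter (pvSkeleton t) (pvSkeleton e)).countP
        (fun p => decide (p.1 ≠ p.2) && decide (p ∈ e) && !decide (p ∈ t))
      + (PySem.Set.inter (pvSkeleton t) (pvSkeleton e)).countP
        (fun p => decide (p.1 ≠ p.2) && decide ((p.2, p.1) ∈ e) && !decide ((p.2, p.1) ∈ t))
      = e.countP (fun p => decide (p.1 ≠ p.2) && !decide (p ∈ t) && decide ((p.2, p.1) ∈ t)) := by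
  rw [countP_eq_card (nodup_common t e), countP_eq_card (nodup_common t e), countP_eq_card he]
  have hC : List.toFinset (PySem.Set.inter (pvSkeleton t) (pvSkeleton e)) = pvCF t e := rfl
  rw [hC]
  rw [pvCF_comm]
  have h1 := card_fwd e t (fun p => !decide (p ∈ t))
  have h2 := card_bwd e t (fun p => !decide (p ∈ t))
  have h3 := card_filter_split e.toFinset
    (fun p => !decide (p ∈ t) && decide ((p.2, p.1) ∈ t))
  simp only [decide_eq_true_eq, Bool.and_eq_true, Bool.not_eq_eq_eq_not, Bool.not_true,
    decide_eq_false_iff_not, Bool.and_assoc] at h1 h2 h3 ⊢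
  rw [h1, h2, h3]
  congr 1 <;> apply congrArg <;> apply Finset.filter_congr <;> intro p _ <;>
    constructor <;> intro h <;> tauto

theorem arrowhead_counts_py_spec : Claim_equal_arrowhead_counts_py := by
  intro t e _ hpre
  obtain ⟨ht, he⟩ := hpre
  show arrowhead_counts_py t e = arrowhead_counts_py_alt t e
  have hA : arrowhead_counts_py t e =
      (PySem.Set.inter (pvSkeleton t) (pvSkeleton e)).foldl (pvStep t e) (0, 0, 0) := rfl
  have hB : arrowhead_counts_py_alt t e =
      (((t.countP (fun p => decide (p.1 ≠ p.2) && decide (p ∈ e)) : Int)),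
       ((e.countP (fun p => decide (p.1 ≠ p.2) && !decide (p ∈ t) && decide ((p.2, p.1) ∈ t)) : Int)),
       ((t.countP (fun p => decide (p.1 ≠ p.2) && !decide (p ∈ e) && decide ((p.2, p.1) ∈ e)) : Int))) := rfl
  rw [hA, hB, foldl_pvStep]
  refine Prod.ext ?_ (Prod.ext ?_ ?_)
  · show (0 : Int) + _ = _
    rw [← comp_tp t e ht]
    push_cast
    ring
  · show (0 : Int) + _ = _
    rw [← comp_fp t e he]
    push_cast
    ring
  · show (0 : Int) + _ = _
    rw [← comp_fn t e ht]
    push_cast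
    ring
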